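-- pv_equiv track=rewrite | github.com/geekyuvi069/new_spec | SpecTacularAI12/src/mapping_engine.py | _extract_requirement_content
-- ===== SOURCE A (Python) =====
-- def _extract_requirement_content(text, start, end):
--     """
--     Extract the full context around a requirement match.
--     """
--     # Find sentence boundaries
--     sentences = text.split('.')
--     target_pos = start
--
--     # Find which sentence contains the match
--     current_pos = 0
--     for sentence in sentences:
--         if current_pos <= target_pos <= current_pos + len(sentence):
--             return sentence.strip()
--         current_pos += len(sentence) + 1
--
--     # Fallback: return the match with some context
--     context_start = max(0, start - 100)
--     context_end = min(len(text), end + 100)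
--     return text[context_start:context_end]
-- ===== SOURCE B (Python) =====
-- def _extract_requirement_content(text, start, end):
--     """
--     Extract the full context around a requirement match.
--     """
--     if 0 <= start <= len(text):
--         e = text.find('.', start)
--         if e == -1:
--             e = len(text)
--         s = text.rfind('.', 0, start) + 1
--         return text[s:e].strip()
--     # Fallback: return the match with some context
--     context_start = max(0, start - 100)
--     context_end = min(len(text), end + 100)
--     return text[context_start:context_end]
-- ===== Notes on version B (the rewrite author's own statement) =====
-- stated objective: simpler
-- what changed: Instead of splitting the text on '.' and scanning all sentences with a running position, B locates the sentence boundaries around `start` directly with one find ('.' at or after start) and one rfind ('.' before start), slices between them and strips; the out-of-range fallback window is unchanged.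
import Mathlib
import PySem

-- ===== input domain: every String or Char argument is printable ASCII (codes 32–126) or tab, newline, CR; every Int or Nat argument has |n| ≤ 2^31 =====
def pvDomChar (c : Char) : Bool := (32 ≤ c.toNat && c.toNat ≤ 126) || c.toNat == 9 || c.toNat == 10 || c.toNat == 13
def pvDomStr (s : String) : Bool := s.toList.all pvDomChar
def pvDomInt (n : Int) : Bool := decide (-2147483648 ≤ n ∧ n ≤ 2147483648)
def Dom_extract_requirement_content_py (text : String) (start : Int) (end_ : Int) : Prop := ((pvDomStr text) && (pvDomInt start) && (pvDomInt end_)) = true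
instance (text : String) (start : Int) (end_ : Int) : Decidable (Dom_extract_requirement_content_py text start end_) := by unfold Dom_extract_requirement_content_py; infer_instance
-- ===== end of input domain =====

-- B replaces A's split-and-scan over all sentences by direct boundary search
-- (find/rfind around `start`); objective: simpler.


-- ===== PORT A =====
-- the `for sentence in sentences` loop: returns `some` of the matched (stripped)
-- sentence, `none` if the loop falls through to the fallback
def pvRunA (sentences : List (List Char)) (target_pos : Int) (current_pos : Int) :
    Option (List Char) :=
  match sentences with
  | [] => none
  | sentence :: rest =>
      if current_pos ≤ target_pos ∧ target_pos ≤ current_pos + (sentence.length : Int)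
      then some (PySem.Chars.strip sentence)
      else pvRunA rest target_pos (current_pos + (sentence.length : Int) + 1)

def extract_requirement_content_py (text : String) (start : Int) (end_ : Int) : String :=
  let cs := text.toList
  let sentences := PySem.Chars.splitOn cs ['.']
  match pvRunA sentences start 0 with
  | some r => String.mk r
  | none =>
      let context_start := max 0 (start - 100)
      let context_end := min ((cs.length : Int)) (end_ + 100)
      String.mk (PySem.List.slice cs (some context_start) (some context_end))

-- ===== PORT B =====
def extract_requirement_content_py_alt (text : String) (start : Int) (end_ : Int) : String :=
  let cs := text.toList
  if 0 ≤ start ∧ start ≤ (cs.length : Int) then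
    let e0 := PySem.Chars.findFrom cs ['.'] start
    let e := if e0 = -1 then ((cs.length : Int)) else e0
    let s := PySem.Chars.rfindFrom cs ['.'] 0 (some start) + 1
    String.mk (PySem.Chars.strip (PySem.List.slice cs (some s) (some e)))
  else
    let context_start := max 0 (start - 100)
    let context_end := min ((cs.length : Int)) (end_ + 100)
    String.mk (PySem.List.slice cs (some context_start) (some context_end))

-- ===== PRECONDITION & SPEC =====
def Spec_extract_requirement_content_py (text : String) (start : Int) (end_ : Int) (out : String) : Prop := out = extract_requirement_content_py_alt text start end_
instance (text : String) (start : Int) (end_ : Int) (out : String) : Decidable (Spec_extract_requirement_content_py text start end_ out) := by unfold Spec_extract_requirement_content_py; infer_instance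

-- ===== CLAIM (what is proved, stated in full; the proofs are below) =====
def Claim_equal_extract_requirement_content_py : Prop := ∀ (text : String) (start : Int) (end_ : Int), Dom_extract_requirement_content_py text start end_ → Spec_extract_requirement_content_py text start end_ (extract_requirement_content_py text start end_)

-- ===== LEMMAS AND PROOFS =====

theorem modifyHead_id' {α : Type} (l : List α) : List.modifyHead (fun h => h) l = l := by
  cases l <;> simp

-- clean structural model of Python's  text.split('.')
def splitOnDot : List Char → List (List Char)
  | [] => [[]]
  | c :: rest =>
      if c = '.' then [] :: splitOnDot rest
      else List.modifyHead (fun h => c :: h) (splitOnDot rest)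

theorem splitOnDot_ne_nil (cs : List Char) : splitOnDot cs ≠ [] := by
  induction cs with
  | nil => simp [splitOnDot]
  | cons c rest ih =>
      simp only [splitOnDot]
      split_ifs
      · simp
      · cases h : splitOnDot rest with
        | nil => exact absurd h ih
        | cons a l => simp

theorem splitOn_go_eq (fuel : Nat) :
    ∀ (l cur : List Char) (acc : List (List Char)), l.length < fuel →
      PySem.Chars.splitOn.go ['.'] fuel l cur acc
        = acc.reverse ++ List.modifyHead (fun h => cur.reverse ++ h) (splitOnDot l) := by
  induction fuel with
  | zero => intro l cur acc h; omega
  | succ n ih =>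
      intro l cur acc h
      cases l with
      | nil =>
          rw [PySem.Chars.splitOn.go]
          simp [splitOnDot]
          omega
      | cons c rest =>
          rw [PySem.Chars.splitOn.go]
          by_cases hc : c = '.'
          · subst hc
            have hpre : (['.'] : List Char).isPrefixOf ('.' :: rest) = true := by
              simp [List.isPrefixOf]
            rw [if_pos hpre]
            simp only [List.length_cons] at h
            simp only [List.length_singleton, List.drop_one, List.tail_cons]
            rw [ih rest [] (cur.reverse :: acc) (by omega)]
            simp [splitOnDot, modifyHead_id']
          · have hpre : (['.'] : List Char).isPrefixOf (c :: rest) = false := by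
              simp [List.isPrefixOf]
              exact fun hh => (hc hh.symm).elim
            rw [if_neg (by simp [hpre])]
            simp only [List.length_cons] at h
            rw [ih rest (c :: cur) acc (by omega)]
            simp only [splitOnDot, if_neg hc]
            cases hsp : splitOnDot rest with
            | nil => exact absurd hsp (splitOnDot_ne_nil rest)
            | cons a l => simp

theorem splitOn_eq_splitOnDot (cs : List Char) :
    PySem.Chars.splitOn cs ['.'] = splitOnDot cs := by
  have := splitOn_go_eq (cs.length + 1) cs [] [] (by omega)
  simpa [PySem.Chars.splitOn, modifyHead_id'] using this

-- prefix/getElem bridge for the single-character pattern ['.']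
theorem dot_prefix_iff (l : List Char) : (['.'] <+: l) ↔ l.head? = some '.' := by
  cases l with
  | nil => simp
  | cons x xs => simp [List.cons_prefix_cons, eq_comm]

theorem dot_prefix_drop_iff (xs : List Char) (i : Nat) :
    (['.'] <+: xs.drop i) ↔ xs[i]? = some '.' := by
  rw [dot_prefix_iff, List.head?_drop]

-- ---- find: first-occurrence characterization on a decomposition ----
theorem find_nodot (xs : List Char) (h : '.' ∉ xs) : PySem.Chars.find xs ['.'] = -1 := by
  rw [PySem.Chars.find_eq_neg_one_iff]
  intro hinf
  exact h (hinf.subset (by simp))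

theorem find_split (p q : List Char) (hp : '.' ∉ p) :
    PySem.Chars.find (p ++ '.' :: q) ['.'] = (p.length : Int) := by
  have hinf : (['.'] : List Char) <:+: (p ++ '.' :: q) := ⟨p, q, by simp⟩
  have h0 : 0 ≤ PySem.Chars.find (p ++ '.' :: q) ['.'] :=
    (PySem.Chars.find_nonneg_iff _ _).mpr hinf
  rcases PySem.Chars.find_spec h0 with ⟨hpre, hmin⟩
  set f := PySem.Chars.find (p ++ '.' :: q) ['.'] with hf
  rw [dot_prefix_drop_iff] at hpre
  have hne : f.toNat = p.length := by
    rcases Nat.lt_trichotomy f.toNat p.length with hlt | heq | hgt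
    · exfalso
      rw [List.getElem?_append_left hlt] at hpre
      exact hp (List.mem_of_getElem? hpre)
    · exact heq
    · exfalso
      refine hmin p.length hgt ?_
      rw [dot_prefix_drop_iff]
      rw [List.getElem?_append_right (le_refl _)]
      simp
  omega

theorem rfind_go_nodot (xs : List Char) (h : '.' ∉ xs) (j : Nat) :
    PySem.Chars.rfind.go xs ['.'] j = -1 := by
  induction j with
  | zero =>
      rw [PySem.Chars.rfind.go]
      rw [if_neg]
      intro hpre
      exact h ((List.isPrefixOf_iff_prefix.mp hpre).subset (by simp))
  | succ j ih =>
      rw [PySem.Chars.rfind.go]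
      rw [if_neg, ih]
      intro hpre
      have := (dot_prefix_drop_iff xs (j + 1)).mp (List.isPrefixOf_iff_prefix.mp hpre)
      exact h (List.mem_of_getElem? this)

theorem rfind_nodot (xs : List Char) (h : '.' ∉ xs) : PySem.Chars.rfind xs ['.'] = -1 := by
  rw [PySem.Chars.rfind]
  exact rfind_go_nodot xs h xs.length

theorem rfind_go_split (p q : List Char) (hq : '.' ∉ q) (j : Nat) (hj : p.length ≤ j) :
    PySem.Chars.rfind.go (p ++ '.' :: q) ['.'] j = (p.length : Int) := by
  induction j with
  | zero =>
      have hp0 : p.length = 0 := by omega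
      have hp : p = [] := List.length_eq_zero_iff.mp hp0
      subst hp
      rw [PySem.Chars.rfind.go]
      rw [if_pos (List.isPrefixOf_iff_prefix.mpr (by simp [List.cons_prefix_cons]))]
      simp
  | succ j ih =>
      rw [PySem.Chars.rfind.go]
      by_cases hpre : (['.'] : List Char).isPrefixOf (List.drop (j + 1) (p ++ '.' :: q)) = true
      · rw [if_pos hpre]
        have hget := (dot_prefix_drop_iff _ (j + 1)).mp (List.isPrefixOf_iff_prefix.mp hpre)
        have heq : j + 1 = p.length := by
          by_contra hne
          have hgt : p.length < j + 1 := by omega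
          rw [List.getElem?_append_right (by omega)] at hget
          rcases Nat.exists_eq_add_of_lt hgt with ⟨k, hk⟩
          have : j + 1 - p.length = k + 1 := by omega
          rw [this] at hget
          simp only [List.getElem?_cons_succ] at hget
          exact hq (List.mem_of_getElem? hget)
        rw [← heq]
      · rw [if_neg hpre]
        have hne : p.length ≠ j + 1 := by
          intro he
          apply hpre
          apply List.isPrefixOf_iff_prefix.mpr
          rw [dot_prefix_drop_iff, ← he, List.getElem?_append_right (le_refl _)]
          simp
        exact ih (by omega)

theorem rfind_split (p q : List Char) (hq : '.' ∉ q) :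
    PySem.Chars.rfind (p ++ '.' :: q) ['.'] = (p.length : Int) := by
  rw [PySem.Chars.rfind]
  exact rfind_go_split p q hq _ (by simp)

-- ---- first/last occurrence decompositions ----
theorem exists_first_split {c : Char} {l : List Char} (h : c ∈ l) :
    ∃ p q, l = p ++ c :: q ∧ c ∉ p := by
  induction l with
  | nil => cases h
  | cons x xs ih =>
      by_cases hx : x = c
      · exact ⟨[], xs, by simp [hx], by simp⟩
      · rcases ih (by rcases List.mem_cons.mp h with h' | h'; exact absurd h'.symm hx; exact h') with ⟨p, q, rfl, hp⟩
        exact ⟨x :: p, q, rfl, by simp [hp]; exact fun e => hx e.symm⟩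

theorem exists_last_split {c : Char} {l : List Char} (h : c ∈ l) :
    ∃ p q, l = p ++ c :: q ∧ c ∉ q := by
  induction l with
  | nil => cases h
  | cons x xs ih =>
      by_cases hxs : c ∈ xs
      · rcases ih hxs with ⟨p, q, rfl, hq⟩
        exact ⟨x :: p, q, rfl, hq⟩
      · have hx : x = c := by rcases List.mem_cons.mp h with h' | h'; exact h'.symm; exact absurd h' hxs
        exact ⟨[], xs, by simp [hx], hxs⟩

-- ---- splitOnDot on decompositions ----
theorem splitOnDot_nodot (cs : List Char) (h : '.' ∉ cs) : splitOnDot cs = [cs] := by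
  induction cs with
  | nil => rfl
  | cons c rest ih =>
      simp only [List.mem_cons, not_or] at h
      have hc : ¬ c = '.' := fun e => h.1 e.symm
      simp [splitOnDot, hc, ih h.2]

theorem splitOnDot_split (p r : List Char) (hp : '.' ∉ p) :
    splitOnDot (p ++ '.' :: r) = p :: splitOnDot r := by
  induction p with
  | nil => simp [splitOnDot]
  | cons c pre ih =>
      simp only [List.mem_cons, not_or] at hp
      have hc : ¬ c = '.' := fun e => hp.1 e.symm
      simp [splitOnDot, hc, ih hp.2]

-- ---- the loop ----
theorem pvRunA_shift (segs : List (List Char)) (t c : Int) :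
    pvRunA segs t c = pvRunA segs (t - c) 0 := by
  induction segs generalizing t c with
  | nil => rfl
  | cons s rest ih =>
      simp only [pvRunA]
      by_cases h : c ≤ t ∧ t ≤ c + (s.length : Int)
      · rw [if_pos h, if_pos (by omega)]
      · rw [if_neg h, if_neg (by omega), ih t (c + (s.length : Int) + 1),
            ih (t - c) (0 + (s.length : Int) + 1)]
        congr 1; omega

def pvSpan : List (List Char) → Int
  | [] => -1
  | s :: rest => (s.length : Int) + 1 + pvSpan rest

theorem pvSpan_ge (segs : List (List Char)) : -1 ≤ pvSpan segs := by
  induction segs with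
  | nil => simp [pvSpan]
  | cons s rest ih => simp only [pvSpan]; omega

theorem pvSpan_splitOnDot (cs : List Char) : pvSpan (splitOnDot cs) = (cs.length : Int) := by
  induction cs with
  | nil => simp [splitOnDot, pvSpan]
  | cons c rest ih =>
      by_cases hc : c = '.'
      · simp only [splitOnDot, if_pos hc, pvSpan, List.length_nil, List.length_cons, ih]
        push_cast
        omega
      · simp only [splitOnDot, if_neg hc]
        cases hsp : splitOnDot rest with
        | nil => exact absurd hsp (splitOnDot_ne_nil rest)
        | cons a l =>
            rw [hsp] at ih
            simp only [List.modifyHead, pvSpan, List.length_cons] at *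
            omega

theorem pvRunA_none_lt (segs : List (List Char)) (t c : Int) (h : t < c) :
    pvRunA segs t c = none := by
  induction segs generalizing c with
  | nil => rfl
  | cons s rest ih =>
      simp only [pvRunA]
      rw [if_neg (by omega)]
      exact ih _ (by omega)

theorem pvRunA_none_gt (segs : List (List Char)) (t c : Int) (h : c + pvSpan segs < t) :
    pvRunA segs t c = none := by
  induction segs generalizing c with
  | nil => rfl
  | cons s rest ih =>
      simp only [pvSpan] at h
      have hr := pvSpan_ge rest
      simp only [pvRunA]
      rw [if_neg (by omega)]
      exact ih _ (by omega)

-- ---- reduce findFrom / rfindFrom to find / rfind ----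
theorem findFrom_eval (cs : List Char) (t : Int) (h0 : 0 ≤ t) (h1 : t ≤ (cs.length : Int)) :
    PySem.Chars.findFrom cs ['.'] t
      = if PySem.Chars.find (cs.drop t.toNat) ['.'] = -1 then -1
        else t + PySem.Chars.find (cs.drop t.toNat) ['.'] := by
  have ht : t = (t.toNat : Int) := (Int.toNat_of_nonneg h0).symm
  rw [ht]
  exact PySem.Chars.findFrom_natCast cs ['.'] t.toNat (by omega)

theorem rfindFrom_eval (cs : List Char) (t : Int) (h0 : 0 ≤ t) (h1 : t ≤ (cs.length : Int)) :
    PySem.Chars.rfindFrom cs ['.'] 0 (some t)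
      = PySem.Chars.rfind (cs.take t.toNat) ['.'] := by
  simp only [PySem.Chars.rfindFrom]
  rw [if_neg (not_lt.mpr h1), if_neg (not_lt.mpr h0), if_neg (lt_irrefl 0), if_neg (not_lt.mpr h0)]
  simp only [Int.toNat_zero, List.drop_zero]
  split
  · next h => exact h.symm
  · omega

-- ---- slice on in-range Nat bounds ----
theorem slice_eval (cs : List Char) (a b : Nat) (ha : a ≤ cs.length) (hb : b ≤ cs.length) :
    PySem.List.slice cs (some (a : Int)) (some (b : Int)) = (cs.take b).drop a := by
  simp only [PySem.List.slice, PySem.List.clampIdx]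
  rw [if_neg (by omega), if_neg (by omega)]
  simp only [Int.toNat_natCast]
  rw [Nat.min_eq_left ha, Nat.min_eq_left hb, List.drop_take]

theorem slice_shift (pre rest : List Char) (c : Char) (a b : Nat)
    (ha : a ≤ rest.length) (hb : b ≤ rest.length) :
    PySem.List.slice (pre ++ c :: rest) (some ((pre.length + 1 + a : Nat) : Int))
        (some ((pre.length + 1 + b : Nat) : Int))
      = (rest.take b).drop a := by
  rw [slice_eval _ _ _ (by simp; omega) (by simp; omega)]
  have h1 : pre.length + 1 + b = pre.length + (b + 1) := by omega
  have h2 : pre.length + 1 + a = pre.length + (a + 1) := by omega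
  rw [h1, List.take_length_add_append, List.take_succ_cons, h2]
  have h3 : (pre ++ c :: rest.take b).drop (pre.length + (a + 1))
      = (c :: rest.take b).drop (a + 1) := List.drop_length_add_append _
  rw [h3, List.drop_succ_cons]

theorem pvMain (n : Nat) : ∀ (cs : List Char), cs.length ≤ n → ∀ (t : Int), 0 ≤ t → t ≤ (cs.length : Int) →
    pvRunA (splitOnDot cs) t 0 =
      some (PySem.Chars.strip (PySem.List.slice cs
        (some (PySem.Chars.rfindFrom cs ['.'] 0 (some t) + 1))
        (some (if PySem.Chars.findFrom cs ['.'] t = -1 then (cs.length : Int)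
               else PySem.Chars.findFrom cs ['.'] t)))) := by
  induction n with
  | zero =>
      intro cs hlen t h0 h1
      have hcs : cs = [] := List.length_eq_zero_iff.mp (by omega)
      subst hcs
      have ht : t = 0 := by simp at h1; omega
      subst ht
      rfl
  | succ n ih =>
      intro cs hlen t h0 h1
      rw [findFrom_eval cs t h0 h1, rfindFrom_eval cs t h0 h1]
      by_cases hdot : '.' ∈ cs
      · rcases exists_first_split hdot with ⟨pre, rest, rfl, hp⟩
        have hlen2 : (pre ++ '.' :: rest).length = pre.length + 1 + rest.length := by
          simp only [List.length_append, List.length_cons]; omega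
        by_cases hle : t ≤ (pre.length : Int)
        · -- the match is inside the first sentence
          have hk : t.toNat ≤ pre.length := by omega
          rw [splitOnDot_split pre rest hp]
          simp only [pvRunA]
          rw [if_pos ⟨h0, by omega⟩]
          rw [List.drop_append_of_le_length hk, List.take_append_of_le_length hk]
          rw [find_split (pre.drop t.toNat) rest (fun hm => hp (List.mem_of_mem_drop hm))]
          rw [rfind_nodot _ (fun hm => hp (List.mem_of_mem_take hm))]
          have hL : ¬(((pre.drop t.toNat).length : Int) = -1) := by omega
          rw [if_neg hL]
          have hL2 : ¬(t + ((pre.drop t.toNat).length : Int) = -1) := by omega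
          rw [if_neg hL2]
          have e1 : (-1 : Int) + 1 = ((0 : Nat) : Int) := by norm_num
          have e2 : t + ((pre.drop t.toNat).length : Int) = ((pre.length : Nat) : Int) := by
            simp only [List.length_drop]; omega
          rw [e1, e2, slice_eval _ _ _ (Nat.zero_le _) (by rw [hlen2]; omega)]
          rw [List.drop_zero, List.take_left]
        · -- the match is past the first sentence: recurse on rest
          have hm : pre.length + 1 ≤ t.toNat := by omega
          rw [splitOnDot_split pre rest hp]
          simp only [pvRunA]
          rw [if_neg (by omega)]
          rw [pvRunA_shift]
          have ht'e : t - (0 + (pre.length : Int) + 1) = t - ((pre.length : Int) + 1) := by ring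
          rw [ht'e]
          set t' := t - ((pre.length : Int) + 1) with ht'def
          have h0' : 0 ≤ t' := by omega
          have h1' : t' ≤ (rest.length : Int) := by
            rw [hlen2] at h1; omega
          rw [ih rest (by omega) t' h0' h1']
          rw [findFrom_eval rest t' h0' h1', rfindFrom_eval rest t' h0' h1']
          set m := t'.toNat with hmdef
          have hkm : t.toNat = pre.length + (1 + m) := by omega
          have hdrop : (pre ++ '.' :: rest).drop t.toNat = rest.drop m := by
            rw [hkm, List.drop_length_add_append]
            have : 1 + m = m + 1 := by omega
            rw [this, List.drop_succ_cons]
          have htake : (pre ++ '.' :: rest).take t.toNat = pre ++ '.' :: rest.take m := by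
            rw [hkm, List.take_length_add_append]
            have : 1 + m = m + 1 := by omega
            rw [this, List.take_succ_cons]
          rw [hdrop, htake]
          have hmle : m ≤ rest.length := by omega
          -- the two rfinds
          have hs : ∃ a : Nat, a ≤ rest.length ∧
              PySem.Chars.rfind (pre ++ '.' :: rest.take m) ['.'] + 1
                = ((pre.length + 1 + a : Nat) : Int) ∧
              PySem.Chars.rfind (rest.take m) ['.'] + 1 = ((a : Nat) : Int) := by
            by_cases hq : '.' ∈ rest.take m
            · rcases exists_last_split hq with ⟨p2, q2, heq, hq2⟩
              refine ⟨p2.length + 1, ?_, ?_, ?_⟩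
              · have : (rest.take m).length = p2.length + 1 + q2.length := by
                  rw [heq]; simp only [List.length_append, List.length_cons]; omega
                have h4 : (rest.take m).length ≤ rest.length := by
                  simp
                omega
              · rw [heq]
                have hassoc : pre ++ '.' :: (p2 ++ '.' :: q2)
                    = (pre ++ '.' :: p2) ++ '.' :: q2 := by simp
                rw [hassoc, rfind_split (pre ++ '.' :: p2) q2 hq2]
                simp only [List.length_append, List.length_cons]; push_cast; omega
              · rw [heq, rfind_split p2 q2 hq2]; push_cast; omega
            · refine ⟨0, by omega, ?_, ?_⟩
              · rw [rfind_split pre (rest.take m) hq]; push_cast; omega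
              · rw [rfind_nodot _ hq]; norm_num
          rcases hs with ⟨a, hale, hs1, hs2⟩
          rw [hs1, hs2]
          -- the two finds share the same value F
          set F := PySem.Chars.find (rest.drop m) ['.'] with hFdef
          by_cases hF : F = -1
          · rw [if_pos hF, if_pos hF, if_pos rfl, if_pos rfl]
            have eb : ((pre ++ '.' :: rest).length : Int)
                = ((pre.length + 1 + rest.length : Nat) : Int) := by rw [hlen2]
            rw [eb, slice_shift _ _ _ _ _ hale (le_refl _)]
            rw [slice_eval _ _ _ hale (le_refl _)]
          · rw [if_neg hF, if_neg hF]
            have hF0 : 0 ≤ F := by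
              have := PySem.Chars.neg_one_le_find (rest.drop m) ['.']
              omega
            have hFle : F ≤ ((rest.drop m).length : Int) :=
              PySem.Chars.find_le_length (rest.drop m) ['.']
            have hFle' : m + F.toNat ≤ rest.length := by
              simp only [List.length_drop] at hFle; omega
            have ec : t + F = ((pre.length + 1 + (m + F.toNat) : Nat) : Int) := by
              push_cast; omega
            have ec2 : t' + F = (((m + F.toNat) : Nat) : Int) := by push_cast; omega
            rw [ec, ec2]
            rw [if_neg (show ¬(((pre.length + 1 + (m + F.toNat) : Nat) : Int) = -1) by omega)]
            rw [if_neg (show ¬((((m + F.toNat) : Nat) : Int) = -1) by omega)]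
            rw [slice_shift _ _ _ _ _ hale hFle', slice_eval _ _ _ hale hFle']
      · -- no dot at all: a single sentence
        rw [splitOnDot_nodot cs hdot]
        simp only [pvRunA]
        rw [if_pos ⟨h0, by omega⟩]
        rw [find_nodot _ (fun hm => hdot (List.mem_of_mem_drop hm))]
        rw [rfind_nodot _ (fun hm => hdot (List.mem_of_mem_take hm))]
        rw [if_pos rfl, if_pos rfl]
        have e1 : (-1 : Int) + 1 = ((0 : Nat) : Int) := by norm_num
        rw [e1, slice_eval cs 0 cs.length (Nat.zero_le _) (le_refl _)]
        rw [List.drop_zero, List.take_length]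

theorem extract_requirement_content_py_spec : Claim_equal_extract_requirement_content_py := by
  unfold Claim_equal_extract_requirement_content_py
  intro text start end_ _
  unfold Spec_extract_requirement_content_py
  unfold extract_requirement_content_py extract_requirement_content_py_alt
  by_cases h : 0 ≤ start ∧ start ≤ ((text.toList.length : Int))
  · rw [if_pos h]
    simp only [splitOn_eq_splitOnDot,
      pvMain text.toList.length text.toList (le_refl _) start h.1 h.2]
  · rw [if_neg h]
    have hnone : pvRunA (splitOnDot text.toList) start 0 = none := by
      by_cases h0 : start < 0
      · exact pvRunA_none_lt _ _ _ (by omega)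
      · refine pvRunA_none_gt _ _ _ ?_
        rw [pvSpan_splitOnDot]
        omega
    simp only [splitOn_eq_splitOnDot, hnone]
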